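-- pv_equiv track=rewrite | github.com/marchiesa/proof-lifting | smt_analysis/category_checks/category_witness_ablation.py | _get_statement_at_line
-- ===== SOURCE A (Python) =====
-- def _get_statement_at_line(bpl_text: str, lineno: int) -> str:
--     """
--     Return the full BPL statement starting at lineno (1-based),
--     collected up to the semicolon.
--     """
--     lines = bpl_text.splitlines()
--     idx = lineno - 1
--     if idx < 0 or idx >= len(lines):
--         return ""
--     text = lines[idx]
--     j = idx + 1
--     while ";" not in text and j < len(lines):
--         text += " " + lines[j]
--         j += 1
--     return text.strip()
-- ===== SOURCE B (Python) =====
-- def _get_statement_at_line(bpl_text: str, lineno: int) -> str: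
--     """Locate the boundary line first, then assemble the statement in one join."""
--     lines = bpl_text.splitlines()
--     idx = lineno - 1
--     if idx < 0 or idx >= len(lines):
--         return ""
--     k = next((i for i, ln in enumerate(lines[idx:], idx) if ";" in ln),
--              len(lines) - 1)
--     return " ".join(lines[idx:k + 1]).strip()
-- ===== Notes on version B (the rewrite author's own statement) =====
-- stated objective: simpler
-- what changed: B first locates the boundary line (first line from idx containing ';', falling back to the last line) and then builds the result with a single ' '.join over the slice, instead of A's while loop that grows a string and re-tests the growing string for ';' on every iteration.
import Mathlib
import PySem

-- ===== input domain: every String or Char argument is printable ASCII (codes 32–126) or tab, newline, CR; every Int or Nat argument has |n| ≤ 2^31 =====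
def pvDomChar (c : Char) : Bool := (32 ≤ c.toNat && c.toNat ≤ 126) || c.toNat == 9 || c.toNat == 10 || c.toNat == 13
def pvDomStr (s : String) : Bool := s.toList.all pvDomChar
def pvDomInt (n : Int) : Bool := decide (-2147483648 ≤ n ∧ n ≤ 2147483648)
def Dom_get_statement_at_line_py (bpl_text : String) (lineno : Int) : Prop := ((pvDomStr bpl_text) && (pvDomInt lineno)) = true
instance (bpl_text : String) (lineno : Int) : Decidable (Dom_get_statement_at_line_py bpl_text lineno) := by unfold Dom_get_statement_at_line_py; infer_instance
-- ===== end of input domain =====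

-- B locates the boundary line first and assembles the statement with one join,
-- instead of growing a string while re-testing a running membership (objective: simpler).

-- ===== PORT A =====
-- A's while loop: grow `text` with the next line while it has no ';' and lines remain
def pvLoopA (text : String) : List String → String
  | [] => text
  | l :: rs => if PySem.Str.isIn ";" text then text else pvLoopA (text ++ " " ++ l) rs

def get_statement_at_line_py (bpl_text : String) (lineno : Int) : String :=
  let lines := PySem.Str.splitlines bpl_text
  let idx := lineno - 1
  if idx < 0 ∨ PySem.List.len lines ≤ idx then ""
  else
    let text := PySem.List.pyGetD lines idx ""
    PySem.Str.strip (pvLoopA text (PySem.List.slice lines (some (idx + 1)) none))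

-- ===== PORT B =====
-- next((i for i, ln in enumerate(lines[idx:], idx) if ";" in ln), …): first index ≥ idx whose line has ';'
def pvFindBoundary : List String → Int → Option Int
  | [], _ => none
  | l :: rs, i => if PySem.Str.isIn ";" l then some i else pvFindBoundary rs (i + 1)

def get_statement_at_line_py_alt (bpl_text : String) (lineno : Int) : String :=
  let lines := PySem.Str.splitlines bpl_text
  let idx := lineno - 1
  if idx < 0 ∨ PySem.List.len lines ≤ idx then ""
  else
    let k := (pvFindBoundary (PySem.List.slice lines (some idx) none) idx).getD
      (PySem.List.len lines - 1)
    PySem.Str.strip (PySem.Str.join " " (PySem.List.slice lines (some idx) (some (k + 1))))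

-- ===== PRECONDITION & SPEC =====
def Spec_get_statement_at_line_py (bpl_text : String) (lineno : Int) (out : String) : Prop := out = get_statement_at_line_py_alt bpl_text lineno
instance (bpl_text : String) (lineno : Int) (out : String) : Decidable (Spec_get_statement_at_line_py bpl_text lineno out) := by unfold Spec_get_statement_at_line_py; infer_instance

-- ===== CLAIM (what is proved, stated in full; the proofs are below) =====
def Claim_equal_get_statement_at_line_py : Prop := ∀ (bpl_text : String) (lineno : Int), Dom_get_statement_at_line_py bpl_text lineno → Spec_get_statement_at_line_py bpl_text lineno (get_statement_at_line_py bpl_text lineno)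

-- ===== LEMMAS AND PROOFS =====

-- does the line contain a semicolon?
def pvSemi (l : String) : Bool := PySem.Str.isIn ";" l

-- the lines up to and including the first one containing ';' (all of them if none does)
def pvG : List String → List String
  | [] => []
  | l :: rs => if pvSemi l then [l] else l :: pvG rs

theorem pv_singleton_infix_iff (c : Char) (l : List Char) : [c] <:+: l ↔ c ∈ l := by
  constructor
  · intro h; exact List.singleton_sublist.mp h.sublist
  · intro h
    obtain ⟨s, t, rfl⟩ := List.append_of_mem h
    exact ⟨s, t, by simp⟩

theorem pvSemi_iff (s : String) : pvSemi s = true ↔ ';' ∈ s.toList := by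
  rw [pvSemi, PySem.Str.isIn_iff_infix]
  have h : (";" : String).toList = [';'] := by decide
  rw [h, pv_singleton_infix_iff]

theorem pvSemi_append (a b : String) :
    pvSemi (a ++ " " ++ b) = (pvSemi a || pvSemi b) := by
  rw [Bool.eq_iff_iff]
  have h : (" " : String).toList = [' '] := by decide
  simp [pvSemi_iff, h]

theorem pv_join_singleton (a : String) : PySem.Str.join " " [a] = a := by
  apply String.toList_inj.mp
  simp [PySem.Chars.join_singleton]

theorem pv_join_cons_cons (a b : String) (xs : List String) :
    PySem.Str.join " " (a :: b :: xs) = a ++ " " ++ PySem.Str.join " " (b :: xs) := by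
  apply String.toList_inj.mp
  have h : (" " : String).toList = [' '] := by decide
  simp [PySem.Chars.join_cons_cons, h]

theorem pv_join_merge (a b : String) (xs : List String) :
    PySem.Str.join " " ((a ++ " " ++ b) :: xs) = PySem.Str.join " " (a :: b :: xs) := by
  rw [pv_join_cons_cons a b xs]
  cases xs with
  | nil => rw [pv_join_singleton, pv_join_singleton]
  | cons c cs =>
      rw [pv_join_cons_cons (a ++ " " ++ b) c cs, pv_join_cons_cons b c cs]
      apply String.toList_inj.mp
      simp

theorem pvLoopA_eq_join (t : List String) : ∀ h : String,
    pvLoopA h t = PySem.Str.join " " (pvG (h :: t)) := by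
  induction t with
  | nil =>
      intro h
      simp only [pvLoopA, pvG]
      split <;> rw [pv_join_singleton]
  | cons l rs ih =>
      intro h
      by_cases hh : pvSemi h
      · simp only [pvLoopA, pvG, pvSemi] at *
        rw [if_pos hh, if_pos hh, pv_join_singleton]
      · have hstep : pvLoopA h (l :: rs) = pvLoopA (h ++ " " ++ l) rs := by
          simp only [pvLoopA]; rw [if_neg (by simpa [pvSemi] using hh)]
        rw [hstep, ih (h ++ " " ++ l)]
        have hG : pvG (h :: l :: rs) = h :: pvG (l :: rs) := by
          simp only [pvG]; rw [if_neg hh]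
        rw [hG]
        have hsem : pvSemi (h ++ " " ++ l) = pvSemi l := by
          rw [pvSemi_append, Bool.eq_false_iff.mpr hh, Bool.false_or]
        by_cases hl : pvSemi l
        · have : pvG ((h ++ " " ++ l) :: rs) = [h ++ " " ++ l] := by
            simp only [pvG]; rw [hsem, if_pos hl]
          rw [this]
          have : pvG (l :: rs) = [l] := by simp only [pvG]; rw [if_pos hl]
          rw [this, pv_join_merge]
        · have h1 : pvG ((h ++ " " ++ l) :: rs) = (h ++ " " ++ l) :: pvG rs := by
            simp only [pvG]; rw [hsem, if_neg hl]
          have h2 : pvG (l :: rs) = l :: pvG rs := by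
            simp only [pvG]; rw [if_neg hl]
          rw [h1, h2, pv_join_merge]

theorem pvFindBoundary_eq (xs : List String) : ∀ i : Int,
    pvFindBoundary xs i = (xs.findIdx? pvSemi).map (fun m : Nat => i + (m : Int)) := by
  induction xs with
  | nil => intro i; simp [pvFindBoundary]
  | cons l rs ih =>
      intro i
      simp only [pvFindBoundary, List.findIdx?_cons]
      by_cases hl : pvSemi l
      · rw [if_pos (by simpa [pvSemi] using hl), if_pos hl]; simp
      · rw [if_neg (by simpa [pvSemi] using hl), if_neg hl, ih (i + 1)]
        cases rs.findIdx? pvSemi <;> simp <;> ring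

theorem pvG_of_some (xs : List String) : ∀ m : Nat, xs.findIdx? pvSemi = some m →
    pvG xs = xs.take (m + 1) := by
  induction xs with
  | nil => intro m hm; simp at hm
  | cons l rs ih =>
      intro m hm
      by_cases hl : pvSemi l
      · rw [List.findIdx?_cons, if_pos hl] at hm
        obtain rfl : (0 : Nat) = m := by simpa using hm
        simp only [pvG]; rw [if_pos hl]; simp
      · rw [List.findIdx?_cons, if_neg hl] at hm
        cases hrs : rs.findIdx? pvSemi with
        | none => rw [hrs] at hm; simp at hm
        | some m' =>
            rw [hrs] at hm
            obtain rfl : m' + 1 = m := by simpa using hm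
            simp only [pvG]; rw [if_neg hl, List.take_succ_cons, ih m' hrs]

theorem pvG_of_none (xs : List String) (h : xs.findIdx? pvSemi = none) : pvG xs = xs := by
  induction xs with
  | nil => rfl
  | cons l rs ih =>
      rw [List.findIdx?_cons] at h
      by_cases hl : pvSemi l
      · rw [if_pos hl] at h; simp at h
      · rw [if_neg hl] at h
        simp only [pvG]; rw [if_neg hl]
        cases hrs : rs.findIdx? pvSemi with
        | none => rw [ih hrs]
        | some m => rw [hrs] at h; simp at h

theorem pv_findIdx?_lt_length {p : String → Bool} {xs : List String} {m : Nat}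
    (h : xs.findIdx? p = some m) : m < xs.length := by
  have := List.findIdx?_eq_some_iff_findIdx_eq.mp h
  omega

-- ===== VERDICT (by name: the statement is the Claim_ definition above) =====
theorem get_statement_at_line_py_spec : Claim_equal_get_statement_at_line_py := by
  intro bpl_text lineno _
  unfold Spec_get_statement_at_line_py get_statement_at_line_py get_statement_at_line_py_alt
  simp only [PySem.List.len_eq]
  set lines := PySem.Str.splitlines bpl_text with hlines
  by_cases hguard : lineno - 1 < 0 ∨ (lines.length : Int) ≤ lineno - 1
  · rw [if_pos hguard, if_pos hguard]
  · rw [if_neg hguard, if_neg hguard]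
    rw [not_or, not_lt, not_le] at hguard
    obtain ⟨h0, hlt⟩ := hguard
    set n : Nat := (lineno - 1).toNat with hn
    have hcast : lineno - 1 = (n : Int) := by omega
    have hnlt : n < lines.length := by omega
    have hdrop : lines.drop n = lines[n] :: lines.drop (n + 1) :=
      List.drop_eq_getElem_cons hnlt
    -- A side
    have hA1 : PySem.List.pyGetD lines (lineno - 1) "" = lines[n] := by
      rw [hcast, PySem.List.pyGetD_natCast, List.getD_eq_getElem _ _ hnlt]
    have hA2 : PySem.List.slice lines (some (lineno - 1 + 1)) none = lines.drop (n + 1) := by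
      rw [show lineno - 1 + 1 = ((n + 1 : Nat) : Int) by omega]
      exact PySem.List.slice_from_natCast ..
    rw [hA1, hA2, pvLoopA_eq_join, ← hdrop]
    -- B side
    have hB0 : PySem.List.slice lines (some (lineno - 1)) none = lines.drop n := by
      rw [hcast]; exact PySem.List.slice_from_natCast ..
    rw [hB0, pvFindBoundary_eq]
    cases hfi : (lines.drop n).findIdx? pvSemi with
    | none =>
        simp only [Option.map_none, Option.getD_none]
        rw [show (lines.length : Int) - 1 + 1 = ((lines.length : Nat) : Int) by omega, hcast,
          PySem.List.slice_natCast, List.take_of_length_le (by simp), pvG_of_none _ hfi]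
    | some m =>
        have hm : m < (lines.drop n).length := pv_findIdx?_lt_length hfi
        simp only [Option.map_some, Option.getD_some]
        rw [show lineno - 1 + (m : Int) + 1 = ((n + m + 1 : Nat) : Int) by omega, hcast,
          PySem.List.slice_natCast, show n + m + 1 - n = m + 1 by omega, pvG_of_some _ m hfi]
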